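-- pv_equiv track=rewrite | github.com/pankajupadhyay29/ML | script/final.py | get_combined_frequency
-- ===== SOURCE A (Python) =====
-- def get_combined_frequency(content, title):
-- 	frequency = []
-- 	inverse_frequency = {}
-- 	length = 0
-- 	if content is not None:
-- 		length = len(content)
-- 	else:
-- 		length = len(title)
-- 	for i in range(length):
-- 		word_count = {}
-- 		important = {}
-- 		if title is not None:
-- 			for word in title[i]:
-- 				if word in word_count:
-- 					word_count[word] = word_count[word] + 100
-- 				else:
-- 					word_count[word] = 10
-- 					important[word] = True
-- 		if content is not None:
-- 			for word in content[i]: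
-- 				if word in word_count:
-- 					if word in important:
-- 						word_count[word] = word_count[word] + 50
-- 					else:
-- 						word_count[word] = word_count[word] + 5
-- 				else:
-- 					word_count[word] = 1
--
-- 		for word in word_count:
-- 			if word in inverse_frequency:
-- 				inverse_frequency[word] = inverse_frequency[word] + 1
-- 			else:
-- 				inverse_frequency[word] = 1
-- 		frequency.append(word_count)
-- 	return (frequency, inverse_frequency)
-- ===== SOURCE B (Python) =====
-- def get_combined_frequency(content, title):
--     length = len(content) if content is not None else len(title)
--     frequency = []
--     inverse_frequency = {}
--     for i in range(length):
--         t = {}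
--         if title is not None:
--             for w in title[i]:
--                 t[w] = t.get(w, 0) + 1
--         c = {}
--         if content is not None:
--             for w in content[i]:
--                 c[w] = c.get(w, 0) + 1
--         word_count = {}
--         for w, k in t.items():
--             word_count[w] = 10 + 100 * (k - 1) + 50 * c.get(w, 0)
--         for w, k in c.items():
--             if w not in t:
--                 word_count[w] = 1 + 5 * (k - 1)
--         for w in word_count:
--             inverse_frequency[w] = inverse_frequency.get(w, 0) + 1
--         frequency.append(word_count)
--     return (frequency, inverse_frequency)
-- ===== Notes on version B (the rewrite author's own statement) =====
-- stated objective: alternative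
-- what changed: Instead of A's incremental per-word dict updates with an 'important' marker dict, B builds per-document occurrence counters for title and content and computes each word's weight by a closed-form formula (10+100*(t-1)+50*c for title words, 1+5*(c-1) for content-only words).
import Mathlib
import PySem

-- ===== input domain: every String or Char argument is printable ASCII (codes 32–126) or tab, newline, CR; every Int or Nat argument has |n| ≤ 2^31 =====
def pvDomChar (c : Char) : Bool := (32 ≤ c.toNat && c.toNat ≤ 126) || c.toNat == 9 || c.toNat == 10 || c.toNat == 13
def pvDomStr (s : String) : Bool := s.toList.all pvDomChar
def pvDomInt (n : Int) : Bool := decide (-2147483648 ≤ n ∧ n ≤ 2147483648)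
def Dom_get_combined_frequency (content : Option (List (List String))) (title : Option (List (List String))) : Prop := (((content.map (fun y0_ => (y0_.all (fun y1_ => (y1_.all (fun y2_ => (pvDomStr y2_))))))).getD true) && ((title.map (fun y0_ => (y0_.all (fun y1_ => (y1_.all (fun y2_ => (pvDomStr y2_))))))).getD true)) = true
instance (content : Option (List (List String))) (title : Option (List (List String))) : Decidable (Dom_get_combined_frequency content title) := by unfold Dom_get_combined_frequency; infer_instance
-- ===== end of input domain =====

-- B computes each document's word weights by closed-form formulas from two per-document
-- occurrence counters instead of A's incremental per-word dict updates (alternative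
-- decomposition; no speed claim).

-- ===== PORT A =====
-- A-side helpers: the three loop bodies of A and the per-document body, as named step functions.
def pvA_titleStep (p : PySem.Dict String Int × PySem.Dict String Bool) (w : String) :
    PySem.Dict String Int × PySem.Dict String Bool :=
  match p.1.get? w with
  | some v => (p.1.insert w (v + 100), p.2)
  | none => (p.1.insert w 10, p.2.insert w true)

def pvA_contentStep (important : PySem.Dict String Bool) (wc : PySem.Dict String Int) (w : String) :
    PySem.Dict String Int :=
  match wc.get? w with
  | some v => if important.contains w then wc.insert w (v + 50) else wc.insert w (v + 5)
  | none => wc.insert w 1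

def pvA_invStep (inv : PySem.Dict String Int) (w : String) : PySem.Dict String Int :=
  match inv.get? w with
  | some v => inv.insert w (v + 1)
  | none => inv.insert w 1

def pvA_doc (content : Option (List (List String))) (title : Option (List (List String)))
    (st : List (List (String × Int)) × PySem.Dict String Int) (i : Nat) :
    List (List (String × Int)) × PySem.Dict String Int :=
  let p1 :=
    match title with
    | some t => (t.getD i []).foldl pvA_titleStep (PySem.Dict.empty, PySem.Dict.empty)
    | none => (PySem.Dict.empty, PySem.Dict.empty)
  let word_count :=
    match content with
    | some c => (c.getD i []).foldl (pvA_contentStep p1.2) p1.1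
    | none => p1.1
  let inverse_frequency := word_count.keys.foldl pvA_invStep st.2
  (st.1 ++ [word_count.items], inverse_frequency)

def get_combined_frequency (content : Option (List (List String))) (title : Option (List (List String))) : (List (List (String × Int))) × (List (String × Int)) :=
  let length : Nat :=
    match content with
    | some c => c.length
    | none => (title.getD []).length
  let res := (List.range length).foldl (pvA_doc content title) ([], PySem.Dict.empty)
  (res.1, res.2.items)

-- ===== PORT B =====
-- B-side helpers: the counter builder and B's per-document body.
def pvB_count (ws : List String) : PySem.Dict String Int :=
  ws.foldl (fun d w => d.insert w (d.getD w 0 + 1)) PySem.Dict.empty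

def pvB_doc (content : Option (List (List String))) (title : Option (List (List String)))
    (st : List (List (String × Int)) × PySem.Dict String Int) (i : Nat) :
    List (List (String × Int)) × PySem.Dict String Int :=
  let t :=
    match title with
    | some ts => pvB_count (ts.getD i [])
    | none => PySem.Dict.empty
  let c :=
    match content with
    | some cs => pvB_count (cs.getD i [])
    | none => PySem.Dict.empty
  let wc := t.items.foldl
    (fun wc p => wc.insert p.1 (10 + 100 * (p.2 - 1) + 50 * c.getD p.1 0)) PySem.Dict.empty
  let wc := c.items.foldl
    (fun wc p => if t.contains p.1 then wc else wc.insert p.1 (1 + 5 * (p.2 - 1))) wc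
  let inv := wc.keys.foldl (fun inv w => inv.insert w (inv.getD w 0 + 1)) st.2
  (st.1 ++ [wc.items], inv)

def get_combined_frequency_alt (content : Option (List (List String))) (title : Option (List (List String))) : (List (List (String × Int))) × (List (String × Int)) :=
  let length : Nat :=
    match content with
    | some c => c.length
    | none => (title.getD []).length
  let res := (List.range length).foldl (pvB_doc content title) ([], PySem.Dict.empty)
  (res.1, res.2.items)

-- ===== PRECONDITION & SPEC =====
-- Pre_ excludes exactly the inputs on which the Python A raises: both arguments None
-- (TypeError on len(None)), and both present with len(content) > len(title)
-- (IndexError on title[i]).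
def Pre_get_combined_frequency (content : Option (List (List String))) (title : Option (List (List String))) : Prop :=
  (content.isSome = true ∨ title.isSome = true) ∧
    (content.isSome = true → title.isSome = true →
      (content.getD []).length ≤ (title.getD []).length)
instance (content : Option (List (List String))) (title : Option (List (List String))) : Decidable (Pre_get_combined_frequency content title) := by unfold Pre_get_combined_frequency; infer_instance

def pvWitness_get_combined_frequency : Option (List (List String)) × Option (List (List String)) :=
  (some [["a", "b", "a"]], some [["a", "c"]])

def Spec_get_combined_frequency (content : Option (List (List String))) (title : Option (List (List String))) (out : (List (List (String × Int))) × (List (String × Int))) : Prop := out = get_combined_frequency_alt content title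
instance (content : Option (List (List String))) (title : Option (List (List String))) (out : (List (List (String × Int))) × (List (String × Int))) : Decidable (Spec_get_combined_frequency content title out) := by unfold Spec_get_combined_frequency; infer_instance

-- ===== CLAIM (what is proved, stated in full; the proofs are below) =====
def Claim_equal_get_combined_frequency : Prop := ∀ (content : Option (List (List String))) (title : Option (List (List String))), Dom_get_combined_frequency content title → Pre_get_combined_frequency content title → Spec_get_combined_frequency content title (get_combined_frequency content title)

-- ===== LEMMAS AND PROOFS =====
theorem pv_get?_mk_not_mem {β : Type} (s : List String) (g : String → β) (k : String)
    (h : k ∉ s) : (PySem.Dict.mk (s.map (fun x => (x, g x)))).get? k = none := by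
  induction s with
  | nil => rfl
  | cons x s ih =>
    simp only [List.map_cons, PySem.Dict.get?_mk_cons]
    have hxk : (x == k) = false := by simp; rintro rfl; exact h (List.mem_cons_self ..)
    rw [if_neg (by simp [hxk]), ih (fun hm => h (List.mem_cons_of_mem _ hm))]

theorem pv_get?_mk_mem {β : Type} (s : List String) (g : String → β) (k : String)
    (hk : k ∈ s) : (PySem.Dict.mk (s.map (fun x => (x, g x)))).get? k = some (g k) := by
  induction s with
  | nil => cases hk
  | cons x s ih =>
    simp only [List.map_cons, PySem.Dict.get?_mk_cons]
    by_cases hxk : x = k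
    · subst hxk; simp
    · rw [if_neg (by simp [hxk]), ih (((List.mem_cons.mp hk).resolve_left (fun he => hxk he.symm)))]

theorem pv_get?_mk_append {β : Type} (l1 l2 : List (String × β)) (k : String) :
    (PySem.Dict.mk (l1 ++ l2)).get? k =
      ((PySem.Dict.mk l1).get? k).or ((PySem.Dict.mk l2).get? k) := by
  induction l1 with
  | nil => simp [show (PySem.Dict.mk ([] : List (String × β))).get? k = none from rfl]
  | cons p l1 ih =>
    obtain ⟨a, b⟩ := p
    simp only [List.cons_append, PySem.Dict.get?_mk_cons]
    split_ifs with h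
    · rfl
    · exact ih

theorem pv_insert_mk_of_contains {β : Type} (l : List (String × β)) (w : String) (v : β)
    (h : (PySem.Dict.mk l).contains w = true) :
    (PySem.Dict.mk l).insert w v =
      PySem.Dict.mk (l.map (fun p => if p.1 == w then (w, v) else p)) := by
  apply PySem.Dict.ext
  rw [PySem.Dict.items_insert_of_contains _ _ h]

theorem pv_insert_mk_of_not_contains {β : Type} (l : List (String × β)) (w : String) (v : β)
    (h : (PySem.Dict.mk l).contains w = false) :
    (PySem.Dict.mk l).insert w v = PySem.Dict.mk (l ++ [(w, v)]) := by
  apply PySem.Dict.ext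
  rw [PySem.Dict.items_insert_of_not_contains _ _ h]

theorem pv_map_replace {β : Type} (s : List String) (g g' : String → β) (w : String) (v : β)
    (hne : ∀ x ∈ s, x ≠ w → g' x = g x) (hv : g' w = v) :
    (s.map (fun x => (x, g x))).map (fun p => if p.1 == w then (w, v) else p) =
      s.map (fun x => (x, g' x)) := by
  rw [List.map_map]
  apply List.map_congr_left
  intro x hx
  by_cases hxw : x = w
  · subst hxw; simp [hv]
  · simp [hxw, hne x hx hxw]

theorem pv_foldl_if_skip {α β : Type} (p : β → Bool) (f : α → β → α) (l : List β) (init : α) :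
    l.foldl (fun a x => if p x then a else f a x) init =
      (l.filter (fun x => !p x)).foldl f init := by
  induction l generalizing init with
  | nil => rfl
  | cons x l ih =>
    by_cases h : p x <;> simp [h, ih]

def pvP1 (tw cw : List String) : List (String × Int) :=
  (PySem.Set.ofList tw).map
    (fun x => (x, (10 : Int) + 100 * ((tw.count x : Int) - 1) + 50 * (cw.count x : Int)))

def pvS2 (tw cw : List String) : List String :=
  (PySem.Set.ofList cw).filter (fun x => !(tw.contains x))

def pvP2 (tw cw : List String) : List (String × Int) :=
  (pvS2 tw cw).map (fun x => (x, (1 : Int) + 5 * ((cw.count x : Int) - 1)))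

theorem pv_count_app_ne (cw : List String) (w x : String) (hxw : x ≠ w) :
    (cw ++ [w]).count x = cw.count x := by
  simp [List.count_append, List.count_singleton']
  intro he; exact hxw he.symm

theorem pv_count_app_self (cw : List String) (w : String) :
    (cw ++ [w]).count w = cw.count w + 1 := by
  simp [List.count_append]

theorem pv_mem_s2 (tw cw : List String) (x : String) (hx : x ∈ pvS2 tw cw) :
    x ∈ cw ∧ x ∉ tw := by
  have := List.mem_filter.mp hx
  refine ⟨(PySem.Set.mem_ofList _ _).mp this.1, ?_⟩
  simpa using this.2

theorem pv_s2_mem (tw cw : List String) (w : String) (hw : w ∈ tw ∨ w ∈ cw) :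
    pvS2 tw (cw ++ [w]) = pvS2 tw cw := by
  unfold pvS2
  rw [PySem.Set.ofList_append_singleton, PySem.Set.add_eq_ite]
  split_ifs with h
  · rfl
  · have hwt : w ∈ tw := by
      rcases hw with hw | hw
      · exact hw
      · exact absurd ((PySem.Set.mem_ofList _ _).mpr hw) h
    rw [List.filter_append]
    simp [hwt]

theorem pv_s2_new (tw cw : List String) (w : String) (hwt : w ∉ tw) (hwc : w ∉ cw) :
    pvS2 tw (cw ++ [w]) = pvS2 tw cw ++ [w] := by
  unfold pvS2
  rw [PySem.Set.ofList_append_singleton,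
    PySem.Set.add_of_not_mem (fun h => hwc ((PySem.Set.mem_ofList _ _).mp h)),
    List.filter_append]
  simp [hwt]



theorem pv_titleFold (tw : List String) :
    tw.foldl pvA_titleStep (PySem.Dict.empty, PySem.Dict.empty) =
      (PySem.Dict.mk ((PySem.Set.ofList tw).map
          (fun w => (w, (10 : Int) + 100 * ((tw.count w : Int) - 1)))),
       PySem.Dict.mk ((PySem.Set.ofList tw).map (fun w => (w, true)))) := by
  induction tw using List.reverseRecOn with
  | nil => rfl
  | append_singleton tw w ih =>
    rw [List.foldl_append, List.foldl_cons, List.foldl_nil, ih]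
    by_cases hw : w ∈ tw
    · have hmem : w ∈ PySem.Set.ofList tw := (PySem.Set.mem_ofList _ _).mpr hw
      have hset : PySem.Set.ofList (tw ++ [w]) = PySem.Set.ofList tw := by
        rw [PySem.Set.ofList_append_singleton, PySem.Set.add_of_mem hmem]
      unfold pvA_titleStep
      rw [pv_get?_mk_mem _ _ _ hmem]
      simp only
      rw [pv_insert_mk_of_contains _ _ _
        (by rw [PySem.Dict.contains_eq_isSome_get?, pv_get?_mk_mem _ _ _ hmem]; rfl)]
      rw [hset]
      congr 1
      congr 1
      apply pv_map_replace
      · intro x hx hxw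
        have : (tw ++ [w]).count x = tw.count x := by
          simp [List.count_append, List.count_singleton']
          intro he; exact hxw he.symm
        rw [this]
      · have : (tw ++ [w]).count w = tw.count w + 1 := by
          simp [List.count_append]
        rw [this]; push_cast; ring
    · have hnmem : w ∉ PySem.Set.ofList tw := fun h => hw ((PySem.Set.mem_ofList _ _).mp h)
      have hset : PySem.Set.ofList (tw ++ [w]) = PySem.Set.ofList tw ++ [w] := by
        rw [PySem.Set.ofList_append_singleton, PySem.Set.add_of_not_mem hnmem]
      unfold pvA_titleStep
      rw [pv_get?_mk_not_mem _ _ _ hnmem]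
      simp only
      rw [pv_insert_mk_of_not_contains _ _ _
        (by rw [PySem.Dict.contains_eq_isSome_get?, pv_get?_mk_not_mem _ _ _ hnmem]; rfl),
        pv_insert_mk_of_not_contains _ _ _
        (by rw [PySem.Dict.contains_eq_isSome_get?, pv_get?_mk_not_mem _ _ _ hnmem]; rfl)]
      rw [hset]
      congr 1
      · congr 1
        rw [List.map_append]
        congr 1
        · apply List.map_congr_left
          intro x hx
          have hxw : x ≠ w := fun he => hnmem (he ▸ hx)
          have : (tw ++ [w]).count x = tw.count x := by
            simp [List.count_append, List.count_singleton']
            intro he; exact hxw he.symm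
          rw [this]
        · have : (tw ++ [w]).count w = tw.count w + 1 := by simp [List.count_append]
          have hz : tw.count w = 0 := List.count_eq_zero.mpr hw
          simp [hz]
      · congr 1
        rw [List.map_append]
        simp

theorem pv_contentFold (tw cw : List String) :
    cw.foldl (pvA_contentStep (PySem.Dict.mk ((PySem.Set.ofList tw).map (fun w => (w, true)))))
      (PySem.Dict.mk (pvP1 tw [])) = PySem.Dict.mk (pvP1 tw cw ++ pvP2 tw cw) := by
  induction cw using List.reverseRecOn with
  | nil =>
    rw [show pvP2 tw [] = [] from rfl, List.append_nil]
    rfl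
  | append_singleton cw w ih =>
    rw [List.foldl_append, List.foldl_cons, List.foldl_nil, ih]
    unfold pvA_contentStep
    unfold pvP1 pvP2
    rw [pv_get?_mk_append]
    by_cases hwt : w ∈ tw
    · -- title word: +50 branch
      have hmemT : w ∈ PySem.Set.ofList tw := (PySem.Set.mem_ofList _ _).mpr hwt
      rw [pv_get?_mk_mem _ _ _ hmemT]
      simp only [Option.some_or]
      rw [PySem.Dict.contains_eq_isSome_get?, pv_get?_mk_mem _ _ _ hmemT]
      simp only [Option.isSome_some, if_true]
      rw [pv_insert_mk_of_contains _ _ _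
        (by rw [PySem.Dict.contains_eq_isSome_get?, pv_get?_mk_append,
              pv_get?_mk_mem _ _ _ hmemT]; rfl)]
      congr 1
      rw [List.map_append]
      congr 1
      · apply pv_map_replace
        · intro x hx hxw
          rw [pv_count_app_ne _ _ _ hxw]
        · rw [pv_count_app_self]; push_cast; ring
      · have h2 : pvS2 tw (cw ++ [w]) = pvS2 tw cw := pv_s2_mem tw cw w (Or.inl hwt)
        rw [h2, List.map_map]
        apply List.map_congr_left
        intro x hx
        have hxw : x ≠ w := fun he => (pv_mem_s2 tw cw x hx).2 (he ▸ hwt)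
        simp [Function.comp, hxw, pv_count_app_ne cw w x hxw]
    · have hnmemT : w ∉ PySem.Set.ofList tw := fun h => hwt ((PySem.Set.mem_ofList _ _).mp h)
      rw [pv_get?_mk_not_mem _ _ _ hnmemT]
      by_cases hwc : w ∈ cw
      · -- seen content-only word: +5 branch
        have hmemS : w ∈ pvS2 tw cw := by
          unfold pvS2
          exact List.mem_filter.mpr ⟨(PySem.Set.mem_ofList _ _).mpr hwc, by simpa using hwt⟩
        rw [pv_get?_mk_mem _ _ _ hmemS]
        simp only [Option.none_or]
        rw [PySem.Dict.contains_eq_isSome_get?, pv_get?_mk_not_mem _ _ _ hnmemT]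
        simp only [Option.isSome_none, Bool.false_eq_true, if_false]
        rw [pv_insert_mk_of_contains _ _ _
          (by rw [PySem.Dict.contains_eq_isSome_get?, pv_get?_mk_append,
                pv_get?_mk_not_mem _ _ _ hnmemT, pv_get?_mk_mem _ _ _ hmemS]; rfl)]
        congr 1
        rw [List.map_append]
        congr 1
        · rw [List.map_map]
          apply List.map_congr_left
          intro x hx
          have hxw : x ≠ w := fun he => hwt (he ▸ (PySem.Set.mem_ofList _ _).mp hx)
          simp [Function.comp, hxw, pv_count_app_ne cw w x hxw]
        · have h2 : pvS2 tw (cw ++ [w]) = pvS2 tw cw := pv_s2_mem tw cw w (Or.inr hwc)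
          rw [h2]
          apply pv_map_replace
          · intro x hx hxw
            rw [pv_count_app_ne _ _ _ hxw]
          · rw [pv_count_app_self]; push_cast; ring
      · -- new content-only word: fresh insert of 1
        have hnmemS : w ∉ pvS2 tw cw := fun h => hwc (pv_mem_s2 tw cw w h).1
        rw [pv_get?_mk_not_mem _ _ _ hnmemS]
        simp only [Option.none_or]
        rw [pv_insert_mk_of_not_contains _ _ _
          (by rw [PySem.Dict.contains_eq_isSome_get?, pv_get?_mk_append,
                pv_get?_mk_not_mem _ _ _ hnmemT, pv_get?_mk_not_mem _ _ _ hnmemS]; rfl)]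
        congr 1
        rw [List.append_assoc]
        congr 1
        · apply List.map_congr_left
          intro x hx
          have hxw : x ≠ w := fun he => hwt (he ▸ (PySem.Set.mem_ofList _ _).mp hx)
          rw [pv_count_app_ne cw w x hxw]
        · rw [pv_s2_new tw cw w hwt hwc, List.map_append]
          congr 1
          · apply List.map_congr_left
            intro x hx
            have hxw : x ≠ w := fun he => hwc (he ▸ (pv_mem_s2 tw cw x hx).1)
            rw [pv_count_app_ne cw w x hxw]
          · have hz : cw.count w = 0 := List.count_eq_zero.mpr hwc
            simp [hz]

theorem pv_count_eq (ws : List String) : pvB_count ws = PySem.Dict.counter ws :=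
  PySem.Dict.foldl_insert_getD_add_one_eq_counter ws

theorem pv_B_wc1 (tw cw : List String) :
    ((pvB_count tw).items.foldl
        (fun wc p => wc.insert p.1 (10 + 100 * (p.2 - 1) + 50 * (pvB_count cw).getD p.1 0))
        PySem.Dict.empty)
      = PySem.Dict.mk (pvP1 tw cw) := by
  rw [pv_count_eq, pv_count_eq, PySem.Dict.items_counter]
  apply PySem.Dict.ext
  refine (PySem.Dict.items_foldl_insert_fresh
      ((PySem.Set.ofList tw).map (fun k => (k, (tw.count k : Int)))) (fun p => p.1)
      (fun p => 10 + 100 * (p.2 - 1) + 50 * (PySem.Dict.counter cw).getD p.1 0) PySem.Dict.empty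
      (fun a _ => PySem.Dict.contains_empty _)
      (by
        rw [List.map_map]
        rw [show ((fun p => (p : String × Int).1) ∘ fun k => (k, (tw.count k : Int))) = fun k => k from rfl,
          List.map_id']
        exact PySem.Set.nodup_ofList tw)).trans ?_
  simp only [List.map_map]
  unfold pvP1
  rw [show PySem.Dict.empty.items = ([] : List (String × Int)) from rfl, List.nil_append]
  apply List.map_congr_left
  intro x hx
  simp [PySem.Dict.getD_counter]

theorem pv_B_wc2 (tw cw : List String) :
    ((pvB_count cw).items.foldl
        (fun wc p => if (pvB_count tw).contains p.1 then wc else wc.insert p.1 (1 + 5 * (p.2 - 1)))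
        (PySem.Dict.mk (pvP1 tw cw)))
      = PySem.Dict.mk (pvP1 tw cw ++ pvP2 tw cw) := by
  rw [pv_count_eq, pv_count_eq, pv_foldl_if_skip, PySem.Dict.items_counter, List.filter_map]
  have hfil : ((PySem.Set.ofList cw).filter
      ((fun p => !(PySem.Dict.counter tw).contains p.1) ∘ fun k => (k, (cw.count k : Int))))
      = pvS2 tw cw := by
    apply List.filter_congr
    intro x hx
    simp [Function.comp, PySem.Dict.contains_counter]
  rw [hfil]
  apply PySem.Dict.ext
  refine (PySem.Dict.items_foldl_insert_fresh
      ((pvS2 tw cw).map (fun k => (k, (cw.count k : Int)))) (fun p => p.1)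
      (fun p => 1 + 5 * (p.2 - 1)) (PySem.Dict.mk (pvP1 tw cw))
      ?hfresh ?hnd).trans ?_
  case hfresh =>
    intro a ha
    obtain ⟨x, hxs, rfl⟩ := List.mem_map.mp ha
    have hxt : x ∉ tw := (pv_mem_s2 tw cw x hxs).2
    rw [PySem.Dict.contains_eq_isSome_get?]
    unfold pvP1
    rw [pv_get?_mk_not_mem _ _ _ (fun h => hxt ((PySem.Set.mem_ofList _ _).mp h))]
    rfl
  case hnd =>
    rw [List.map_map]
    rw [show ((fun p => (p : String × Int).1) ∘ fun k => (k, (cw.count k : Int))) = fun k => k from rfl,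
      List.map_id']
    exact (PySem.Set.nodup_ofList cw).filter _
  rw [List.map_map]
  rfl

theorem pv_invStep_eq :
    pvA_invStep = fun (inv : PySem.Dict String Int) w => inv.insert w (inv.getD w 0 + 1) := by
  funext inv w
  unfold pvA_invStep
  cases h : inv.get? w with
  | none =>
    have hg : inv.getD w 0 = 0 := by simp [PySem.Dict.getD_eq_get?_getD, h]
    simp [hg]
  | some v =>
    have hg : inv.getD w 0 = v := by simp [PySem.Dict.getD_eq_get?_getD, h]
    simp [hg]

theorem pv_wc_eq (tw cw : List String) :
    cw.foldl (pvA_contentStep (tw.foldl pvA_titleStep (PySem.Dict.empty, PySem.Dict.empty)).2)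
        (tw.foldl pvA_titleStep (PySem.Dict.empty, PySem.Dict.empty)).1
      = PySem.Dict.mk (pvP1 tw cw ++ pvP2 tw cw) := by
  rw [pv_titleFold]
  have hb : PySem.Dict.mk ((PySem.Set.ofList tw).map
      (fun w => (w, (10 : Int) + 100 * ((tw.count w : Int) - 1)))) = PySem.Dict.mk (pvP1 tw []) := by
    congr 1
    unfold pvP1
    apply List.map_congr_left
    intro x hx
    simp
  calc cw.foldl (pvA_contentStep (PySem.Dict.mk ((PySem.Set.ofList tw).map (fun w => (w, true)))))
        (PySem.Dict.mk ((PySem.Set.ofList tw).map (fun w => (w, (10 : Int) + 100 * ((tw.count w : Int) - 1)))))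
      = cw.foldl (pvA_contentStep (PySem.Dict.mk ((PySem.Set.ofList tw).map (fun w => (w, true)))))
        (PySem.Dict.mk (pvP1 tw [])) := by rw [hb]
    _ = PySem.Dict.mk (pvP1 tw cw ++ pvP2 tw cw) := pv_contentFold tw cw

theorem pv_wcB_eq (tw cw : List String) :
    ((pvB_count cw).items.foldl
        (fun wc p => if (pvB_count tw).contains p.1 then wc else wc.insert p.1 (1 + 5 * (p.2 - 1)))
        ((pvB_count tw).items.foldl
          (fun wc p => wc.insert p.1 (10 + 100 * (p.2 - 1) + 50 * (pvB_count cw).getD p.1 0))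
          PySem.Dict.empty))
      = PySem.Dict.mk (pvP1 tw cw ++ pvP2 tw cw) := by
  rw [pv_B_wc1, pv_B_wc2]

theorem pv_doc_eq (content title : Option (List (List String))) :
    pvA_doc content title = pvB_doc content title := by
  funext st i
  have core : ∀ tw cw : List String,
      (st.1 ++ [(cw.foldl (pvA_contentStep (tw.foldl pvA_titleStep (PySem.Dict.empty, PySem.Dict.empty)).2)
          (tw.foldl pvA_titleStep (PySem.Dict.empty, PySem.Dict.empty)).1).items],
        (cw.foldl (pvA_contentStep (tw.foldl pvA_titleStep (PySem.Dict.empty, PySem.Dict.empty)).2)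
          (tw.foldl pvA_titleStep (PySem.Dict.empty, PySem.Dict.empty)).1).keys.foldl pvA_invStep st.2)
      = (st.1 ++ [((pvB_count cw).items.foldl
            (fun wc p => if (pvB_count tw).contains p.1 then wc else wc.insert p.1 (1 + 5 * (p.2 - 1)))
            ((pvB_count tw).items.foldl
              (fun wc p => wc.insert p.1 (10 + 100 * (p.2 - 1) + 50 * (pvB_count cw).getD p.1 0))
              PySem.Dict.empty)).items],
          ((pvB_count cw).items.foldl
            (fun wc p => if (pvB_count tw).contains p.1 then wc else wc.insert p.1 (1 + 5 * (p.2 - 1)))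
            ((pvB_count tw).items.foldl
              (fun wc p => wc.insert p.1 (10 + 100 * (p.2 - 1) + 50 * (pvB_count cw).getD p.1 0))
              PySem.Dict.empty)).keys.foldl
            (fun inv w => inv.insert w (inv.getD w 0 + 1)) st.2) := by
    intro tw cw
    rw [pv_wc_eq, pv_wcB_eq, pv_invStep_eq]
  cases title with
  | none =>
    cases content with
    | none => exact core [] []
    | some cs => exact core [] (cs.getD i [])
  | some ts =>
    cases content with
    | none => exact core (ts.getD i []) []
    | some cs => exact core (ts.getD i []) (cs.getD i [])

-- The two ports agree (in fact on every input; Pre_ is needed only for faithfulness to Python).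
theorem pv_ports_eq (content title : Option (List (List String))) :
    get_combined_frequency content title = get_combined_frequency_alt content title := by
  unfold get_combined_frequency get_combined_frequency_alt
  rw [pv_doc_eq]

-- ===== VERDICT (by name: the statement is the Claim_ definition above) =====
theorem get_combined_frequency_spec : Claim_equal_get_combined_frequency := by
  intro content title _ _
  unfold Spec_get_combined_frequency
  exact pv_ports_eq content title
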